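-- pv_equiv track=rewrite | github.com/louisjdmartin/advent_of_code_2024 | jour9/day9.py | is_defrag
-- ===== SOURCE A (Python) =====
-- def is_defrag(disk):
--     is_int = True
--     for x in range(len(disk)):
--         if(is_int and disk[x]!="."):
--             is_int = True
--         elif(is_int and disk[x]=="."):
--             is_int = False
--         elif(not is_int and disk[x]!="."):
--             return False
--     return True
-- ===== SOURCE B (Python) =====
-- def is_defrag(disk):
--     try:
--         idx = list(disk).index(".")
--     except ValueError:
--         return True
--     return all(c == "." for c in disk[idx:])
-- ===== Notes on version B (the rewrite author's own statement) =====
-- stated objective: simpler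
-- what changed: Replaces A's single stateful forward pass with a two-phase locate-then-verify: find the first '.' and check that everything from there on is '.'.
import Mathlib
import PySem

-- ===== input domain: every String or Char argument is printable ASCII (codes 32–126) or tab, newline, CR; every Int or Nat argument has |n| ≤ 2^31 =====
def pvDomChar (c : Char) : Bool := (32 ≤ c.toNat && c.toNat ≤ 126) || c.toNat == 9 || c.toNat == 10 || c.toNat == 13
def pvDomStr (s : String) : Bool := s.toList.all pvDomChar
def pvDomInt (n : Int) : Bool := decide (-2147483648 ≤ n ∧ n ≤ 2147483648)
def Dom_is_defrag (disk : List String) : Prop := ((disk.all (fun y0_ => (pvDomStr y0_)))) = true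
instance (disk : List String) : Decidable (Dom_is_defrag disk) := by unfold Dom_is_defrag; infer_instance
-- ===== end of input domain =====

-- B replaces A's single stateful forward pass by locate-then-verify: find the first ".", then check the suffix is all ".". Return value only; no mutation.
-- ===== PORT A =====
-- loop over disk carrying the is_int flag, as in A's for-loop
def isDefragLoop (is_int : Bool) (xs : List String) : Bool :=
  match xs with
  | [] => true
  | x :: rest =>
    if is_int && x != "." then isDefragLoop true rest
    else if is_int && x == "." then isDefragLoop false rest
    else if !is_int && x != "." then false
    else isDefragLoop is_int rest

def is_defrag (disk : List String) : Bool := isDefragLoop true disk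

-- ===== PORT B =====
def is_defrag_alt (disk : List String) : Bool :=
  match PySem.List.index? disk "." with
  | none => true
  | some idx => (PySem.List.slice disk (some (idx : Int)) none).all (fun c => c == ".")

-- ===== PRECONDITION & SPEC =====
def Spec_is_defrag (disk : List String) (out : Bool) : Prop := out = is_defrag_alt disk
instance (disk : List String) (out : Bool) : Decidable (Spec_is_defrag disk out) := by unfold Spec_is_defrag; infer_instance

-- ===== CLAIM (what is proved, stated in full; the proofs are below) =====
def Claim_equal_is_defrag : Prop := ∀ (disk : List String), Dom_is_defrag disk → Spec_is_defrag disk (is_defrag disk)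

-- ===== LEMMAS AND PROOFS =====

-- ===== VERDICT (by name: the statement is the Claim_ definition above) =====
-- loop with is_int = false is "all dots"
theorem loop_false (xs : List String) : isDefragLoop false xs = xs.all (fun c => c == ".") := by
  induction xs with
  | nil => rfl
  | cons x rest ih =>
    by_cases h : x = "."
    · simp [isDefragLoop, h, ih]
    · simp [isDefragLoop, h]

theorem loop_true_eq_alt (xs : List String) : isDefragLoop true xs = is_defrag_alt xs := by
  induction xs with
  | nil => rfl
  | cons x rest ih =>
    by_cases h : x = "."
    · subst h
      rw [show isDefragLoop true ("." :: rest) = isDefragLoop false rest from by simp [isDefragLoop]]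
      rw [loop_false]
      unfold is_defrag_alt
      rw [PySem.List.index?_cons_self]
      simp [PySem.List.slice_none_none]
    · rw [show isDefragLoop true (x :: rest) = isDefragLoop true rest from by simp [isDefragLoop, h]]
      rw [ih]
      unfold is_defrag_alt
      rw [PySem.List.index?_cons_of_ne rest h]
      cases hf : PySem.List.index? rest "." with
      | none => simp
      | some i =>
        simp only [Option.map_some]
        push_cast
        have h1 : PySem.List.slice (x :: rest) (some ((i + 1 : Nat) : Int)) none
            = (x :: rest).drop (i + 1) := PySem.List.slice_from_natCast _ _
        have h2 : PySem.List.slice rest (some ((i : Nat) : Int)) none = rest.drop i :=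
          PySem.List.slice_from_natCast _ _
        push_cast at h1
        rw [h1, h2]
        rfl

theorem is_defrag_spec : Claim_equal_is_defrag := by
  intro disk _
  unfold Spec_is_defrag is_defrag
  exact loop_true_eq_alt disk
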